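-- pv_equiv track=rewrite | github.com/albop/ae2e6 | scripts/generate_session1_pages.py | ensure_nonempty_python_cells
-- ===== SOURCE A (Python) =====
-- def ensure_nonempty_python_cells(text: str) -> str:
--     """Add a no-op statement to python fences that only contain Quarto options.
--
--     Quarto option-only cells (e.g. only '#| echo: true') can disappear in ipynb
--     export because they are effectively empty code cells.
--     """
--     lines = text.splitlines(keepends=True)
--     out: list[str] = []
--
--     in_py = False
--     block_lines: list[str] = []
--
--     for line in lines:
--         stripped = line.strip()
--
--         if not in_py and stripped.startswith("```{python"):
--             in_py = True
--             out.append(line)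
--             block_lines = []
--             continue
--
--         if in_py and stripped == "```":
--             has_code = any(
--                 ln.strip() and not ln.lstrip().startswith("#|") for ln in block_lines
--             )
--             out.extend(block_lines)
--             if not has_code:
--                 out.append("# TODO\n")
--             out.append(line)
--             in_py = False
--             block_lines = []
--             continue
--
--         if in_py:
--             block_lines.append(line)
--         else:
--             out.append(line)
--
--     # If an unterminated python fence exists, flush buffered lines as-is.
--     if in_py:
--         out.extend(block_lines)
--
--     return "".join(out)
-- ===== SOURCE B (Python) =====
-- def ensure_nonempty_python_cells(text: str) -> str:
--     """Add a no-op statement to python fences that only contain Quarto options."""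
--     lines = text.splitlines(keepends=True)
--     out: list[str] = []
--     n = len(lines)
--     i = 0
--     while i < n:
--         line = lines[i]
--         if line.strip().startswith("```{python"):
--             out.append(line)
--             j = i + 1
--             while j < n and lines[j].strip() != "```":
--                 j += 1
--             block = lines[i + 1 : j]
--             out.extend(block)
--             if j < n:
--                 has_code = any(
--                     ln.strip() and not ln.lstrip().startswith("#|") for ln in block
--                 )
--                 if not has_code:
--                     out.append("# TODO\n")
--                 out.append(lines[j])
--                 i = j + 1
--             else:
--                 i = n
--         else:
--             out.append(line)
--             i += 1
--     return "".join(out)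
-- ===== Notes on version B (the rewrite author's own statement) =====
-- stated objective: alternative
-- what changed: Replaces A's single-pass state machine (in_py flag plus buffered block_lines carried through one fold) with an index-driven outer loop that, on each opener, runs an inner scan forward to the closing fence and processes the whole block at once.
import Mathlib
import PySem

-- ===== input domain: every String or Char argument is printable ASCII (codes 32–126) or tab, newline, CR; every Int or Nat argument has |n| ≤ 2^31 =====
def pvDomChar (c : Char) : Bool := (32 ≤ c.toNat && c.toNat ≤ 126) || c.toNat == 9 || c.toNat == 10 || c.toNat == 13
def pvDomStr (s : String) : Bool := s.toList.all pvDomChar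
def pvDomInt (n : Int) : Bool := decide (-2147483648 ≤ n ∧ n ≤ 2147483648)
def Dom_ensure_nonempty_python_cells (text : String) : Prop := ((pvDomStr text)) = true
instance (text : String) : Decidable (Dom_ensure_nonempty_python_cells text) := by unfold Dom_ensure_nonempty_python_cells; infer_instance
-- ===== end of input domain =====

-- B restructures A's in_py/block_lines state machine as an outer index loop with an
-- inner forward scan to the closing fence; same output, no speed claim (objective: alternative).

-- shared helper: text.splitlines(keepends=True); exact on the ASCII domain
-- (line boundaries there are exactly "\n", "\r\n", "\r")
def pvSplitKeepAux : List Char → List Char → List (List Char)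
  | acc, [] => if acc = [] then [] else [acc.reverse]
  | acc, '\r' :: '\n' :: rest => (acc.reverse ++ ['\r', '\n']) :: pvSplitKeepAux [] rest
  | acc, '\r' :: rest => (acc.reverse ++ ['\r']) :: pvSplitKeepAux [] rest
  | acc, '\n' :: rest => (acc.reverse ++ ['\n']) :: pvSplitKeepAux [] rest
  | acc, c :: rest => pvSplitKeepAux (c :: acc) rest
termination_by _ s => s.length
decreasing_by all_goals (simp; try omega)

def pvSplitKeep (s : List Char) : List (List Char) := pvSplitKeepAux [] s

-- shared: the genexp 'ln.strip() and not ln.lstrip().startswith("#|")' any-ed over a block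
def pvHasCode (block : List (List Char)) : Bool :=
  block.any (fun ln =>
    !(PySem.Chars.strip ln).isEmpty && !(PySem.Chars.startswith (PySem.Chars.lstrip ln) "#|".toList))

-- ===== PORT A =====
-- one step of A's for-loop, state = (out, in_py, block_lines)
def pvStepA (s : List (List Char) × Bool × List (List Char)) (line : List Char) :
    List (List Char) × Bool × List (List Char) :=
  let (out, in_py, block) := s
  let stripped := PySem.Chars.strip line
  if !in_py && PySem.Chars.startswith stripped "```{python".toList then
    (out ++ [line], true, [])
  else if in_py && stripped = "```".toList then
    (out ++ block ++ (if pvHasCode block then [] else ["# TODO\n".toList]) ++ [line], false, [])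
  else if in_py then (out, in_py, block ++ [line])
  else (out ++ [line], in_py, block)

def ensure_nonempty_python_cells (text : String) : String :=
  let lines := pvSplitKeep text.toList
  let r := lines.foldl pvStepA ([], false, [])
  let out := if r.2.1 then r.1 ++ r.2.2 else r.1
  String.mk (PySem.Chars.join [] out)

-- ===== PORT B =====
-- inner scan: collect lines until one strips to "```"; returns (block, some (closer, rest)) or (block, none)
def pvTakeBlock : List (List Char) → List (List Char) × Option (List Char × List (List Char))
  | [] => ([], none)
  | l :: rest =>
    if PySem.Chars.strip l = "```".toList then ([], some (l, rest))
    else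
      let r := pvTakeBlock rest
      (l :: r.1, r.2)

theorem pvTakeBlock_rest_lt (ls : List (List Char)) (c : List Char) (r : List (List Char))
    (h : (pvTakeBlock ls).2 = some (c, r)) : r.length < ls.length := by
  induction ls with
  | nil => simp [pvTakeBlock] at h
  | cons l rest ih =>
    simp only [pvTakeBlock] at h
    split at h
    · simp at h
      obtain ⟨-, h2⟩ := h
      subst h2
      simp
    · simp only at h
      have := ih h
      simp only [List.length_cons]; omega

-- outer loop of B
def pvEmitB : List (List Char) → List (List Char)
  | [] => []
  | line :: rest =>
    if PySem.Chars.startswith (PySem.Chars.strip line) "```{python".toList then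
      match h : pvTakeBlock rest with
      | (block, some (closer, rest')) =>
        line :: (block ++ (if pvHasCode block then [] else ["# TODO\n".toList]) ++
          closer :: pvEmitB rest')
      | (block, none) => line :: block
    else line :: pvEmitB rest
termination_by ls => ls.length
decreasing_by
  · have := pvTakeBlock_rest_lt rest closer rest' (by rw [h])
    simp only [List.length_cons]; omega
  · simp

def ensure_nonempty_python_cells_alt (text : String) : String :=
  String.mk (PySem.Chars.join [] (pvEmitB (pvSplitKeep text.toList)))

-- ===== PRECONDITION & SPEC =====
def Spec_ensure_nonempty_python_cells (text : String) (out : String) : Prop := out = ensure_nonempty_python_cells_alt text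
instance (text : String) (out : String) : Decidable (Spec_ensure_nonempty_python_cells text out) := by unfold Spec_ensure_nonempty_python_cells; infer_instance

-- ===== CLAIM (what is proved, stated in full; the proofs are below) =====
def Claim_equal_ensure_nonempty_python_cells : Prop := ∀ (text : String), Dom_ensure_nonempty_python_cells text → Spec_ensure_nonempty_python_cells text (ensure_nonempty_python_cells text)

-- ===== LEMMAS AND PROOFS =====

-- finalize A's fold result (the trailing 'if in_py: out.extend(block_lines)')
def pvFinA (r : List (List Char) × Bool × List (List Char)) : List (List Char) :=
  if r.2.1 then r.1 ++ r.2.2 else r.1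

-- what B produces after a closing-fence search, given the lines buffered so far
def pvResumeB (block : List (List Char)) (ls : List (List Char)) : List (List Char) :=
  match pvTakeBlock ls with
  | (blk, some (closer, rest')) =>
    block ++ blk ++ (if pvHasCode (block ++ blk) then [] else ["# TODO\n".toList]) ++
      closer :: pvEmitB rest'
  | (blk, none) => block ++ blk

-- the main invariant, by strong induction on the number of remaining lines
theorem pvMain (n : Nat) : ∀ (ls : List (List Char)), ls.length ≤ n →
    (∀ out, pvFinA (ls.foldl pvStepA (out, false, [])) = out ++ pvEmitB ls) ∧
    (∀ out block, pvFinA (ls.foldl pvStepA (out, true, block)) = out ++ pvResumeB block ls) := by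
  induction n with
  | zero =>
    intro ls hls
    have : ls = [] := List.length_eq_zero_iff.mp (Nat.le_zero.mp hls)
    subst this
    constructor
    · intro out; simp [pvFinA, pvEmitB]
    · intro out block; simp [pvFinA, pvResumeB, pvTakeBlock]
  | succ n ih =>
    intro ls hls
    match ls with
    | [] =>
      constructor
      · intro out; simp [pvFinA, pvEmitB]
      · intro out block; simp [pvFinA, pvResumeB, pvTakeBlock]
    | line :: rest =>
      have hrest : rest.length ≤ n := by simp at hls; omega
      constructor
      · intro out
        by_cases hop : PySem.Chars.startswith (PySem.Chars.strip line) ['`', '`', '`', '{', 'p', 'y', 't', 'h', 'o', 'n'] = true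
        · -- opener: enter python state with empty block
          have hstep : pvStepA (out, false, []) line = (out ++ [line], true, []) := by
            simp [pvStepA, hop]
          simp only [List.foldl_cons, hstep]
          rw [(ih rest hrest).2 (out ++ [line]) []]
          rw [pvEmitB]
          simp only [pvResumeB]
          rcases htb : pvTakeBlock rest with ⟨blk, o⟩
          cases o with
          | none => simp [hop, List.append_assoc]
          | some p =>
            rcases p with ⟨closer, rest'⟩
            simp [hop, List.append_assoc]
        · -- ordinary line outside a fence
          rw [Bool.not_eq_true] at hop
          have hstep : pvStepA (out, false, []) line = (out ++ [line], false, []) := by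
            simp [pvStepA, hop]
          simp only [List.foldl_cons, hstep]
          rw [(ih rest hrest).1 (out ++ [line])]
          rw [pvEmitB]
          simp [hop, List.append_assoc]
      · intro out block
        by_cases hcl : PySem.Chars.strip line = ['`', '`', '`']
        · -- closing fence
          have hop : PySem.Chars.startswith (PySem.Chars.strip line) ['`', '`', '`', '{', 'p', 'y', 't', 'h', 'o', 'n'] = false := by
            rw [hcl]; decide
          have hstep : pvStepA (out, true, block) line =
              (out ++ block ++ (if pvHasCode block then [] else ["# TODO\n".toList]) ++ [line],
               false, []) := by
            simp [pvStepA, hcl]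
          simp only [List.foldl_cons, hstep]
          rw [(ih rest hrest).1 _]
          rw [pvResumeB]
          simp only [pvTakeBlock]
          simp [hcl, List.append_assoc]
        · -- line inside a fence: buffered
          have hstep : pvStepA (out, true, block) line = (out, true, block ++ [line]) := by
            simp [pvStepA, hcl]
          simp only [List.foldl_cons, hstep]
          rw [(ih rest hrest).2 out (block ++ [line])]
          rw [pvResumeB, pvResumeB]
          simp only [pvTakeBlock]
          rcases htb : pvTakeBlock rest with ⟨blk, o⟩
          cases o with
          | none => simp [hcl, List.append_assoc]
          | some p =>
            rcases p with ⟨closer, rest'⟩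
            have hass : block ++ [line] ++ blk = block ++ (line :: blk) := by simp
            simp [hcl, hass, List.append_assoc]

-- ===== VERDICT (by name: the statement is the Claim_ definition above) =====
theorem ensure_nonempty_python_cells_spec : Claim_equal_ensure_nonempty_python_cells := by
  intro text _
  unfold Spec_ensure_nonempty_python_cells ensure_nonempty_python_cells ensure_nonempty_python_cells_alt
  have h := (pvMain (pvSplitKeep text.toList).length (pvSplitKeep text.toList) le_rfl).1 []
  simp only [pvFinA] at h
  simp [h]
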